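-- pv_equiv track=rewrite | github.com/bluekms/PythonStudy | 04.py | solution
-- ===== SOURCE A (Python) =====
-- def solution(동물, 자리):
--     의자 = [] * 자리
--     answer = 0
--
--     for i in 동물:
--         if len(의자) < 3:
--             if i in 의자:
--                 히트된페이지 = 의자.pop(의자.index(i))
--                 의자.append(히트된페이지)
--                 answer += 1
--             else:
--                 의자.append(i)
--                 answer += 60
--         else:
--             if i in 의자:
--                 히트된페이지 = 의자.pop(의자.index(i))
--                 의자.append(히트된페이지)
--                 answer += 1
--             else:
--                 의자.pop(0)
--                 의자.append(i)
--                 answer += 60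
--
--     return f"{answer // 60}분 {answer % 60}초"
-- ===== SOURCE B (Python) =====
-- def solution(동물, 자리):
--     # Stack-distance formulation: no cache is simulated. An access hits an LRU
--     # cache of size 3 iff the value is among the 3 most recently used distinct
--     # values of the history, recomputed per access from the history itself.
--     answer = 0
--     past = []
--     for i in 동물:
--         recent = []
--         for x in reversed(past):
--             if x not in recent:
--                 recent.append(x)
--                 if len(recent) == 3:
--                     break
--         answer += 1 if i in recent else 60
--         past.append(i)
--     return f"{answer // 60}분 {answer % 60}초"
-- ===== Notes on version B (the rewrite author's own statement) =====
-- stated objective: alternative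
-- what changed: B simulates no cache at all: it uses the stack-distance characterization of LRU, classifying each access as a hit iff its value is among the 3 most recently used distinct values of the access history, found by a backward scan of the history per access; A's mutable cache with move-to-back hits and front eviction disappears.
import Mathlib
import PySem

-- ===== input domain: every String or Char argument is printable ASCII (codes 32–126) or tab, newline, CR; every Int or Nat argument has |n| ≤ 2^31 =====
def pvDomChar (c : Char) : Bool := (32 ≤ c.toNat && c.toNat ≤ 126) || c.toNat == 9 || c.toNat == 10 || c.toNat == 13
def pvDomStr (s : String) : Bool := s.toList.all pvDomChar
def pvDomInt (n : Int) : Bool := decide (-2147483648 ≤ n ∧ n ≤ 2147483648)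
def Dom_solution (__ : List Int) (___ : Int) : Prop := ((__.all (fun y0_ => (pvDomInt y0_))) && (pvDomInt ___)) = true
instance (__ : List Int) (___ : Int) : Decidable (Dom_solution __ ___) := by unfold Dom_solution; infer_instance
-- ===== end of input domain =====

-- B simulates no cache: it uses the stack-distance characterization of LRU — an access
-- hits iff its value is among the 3 most recently used distinct values of the history,
-- recomputed per access (objective: alternative; not faster).

-- ===== PORT A =====
-- one iteration of A's for-loop: state = (의자, answer)
def solutionStepA (s : List Int × Int) (i : Int) : List Int × Int :=
  if s.1.length < 3 then
    if i ∈ s.1 then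
      match PySem.List.index? s.1 i with
      | some idx =>
        match PySem.List.pop? s.1 (idx : Int) with
        | some (hit, rest) => (rest ++ [hit], s.2 + 1)
        | none => s          -- unreachable: idx is a valid index
      | none => s            -- unreachable: i ∈ 의자
    else (s.1 ++ [i], s.2 + 60)
  else
    if i ∈ s.1 then
      match PySem.List.index? s.1 i with
      | some idx =>
        match PySem.List.pop? s.1 (idx : Int) with
        | some (hit, rest) => (rest ++ [hit], s.2 + 1)
        | none => s          -- unreachable
      | none => s            -- unreachable
    else
      match PySem.List.pop? s.1 (0 : Int) with
      | some (_, rest) => (rest ++ [i], s.2 + 60)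
      | none => s            -- unreachable: here len 의자 = 3

def solution (__ : List Int) (___ : Int) : String :=
  -- 의자 = [] * 자리  is the empty list for every 자리
  PySem.Int.toStr (PySem.Int.floordiv (__.foldl solutionStepA (([] : List Int), (0 : Int))).2 60) ++ "분 " ++
    PySem.Int.toStr (PySem.Int.mod (__.foldl solutionStepA (([] : List Int), (0 : Int))).2 60) ++ "초"

-- ===== PORT B =====
-- B's inner loop: walk the history back-to-front collecting distinct values,
-- stopping (break) as soon as the 3 most recent distinct values are known
def rec3 (acc : List Int) : List Int → List Int
  | [] => acc
  | x :: xs =>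
    if x ∈ acc then rec3 acc xs
    else if (acc ++ [x]).length = 3 then acc ++ [x]
    else rec3 (acc ++ [x]) xs

-- one iteration of B's for-loop: state = (past, answer)
def solutionStepB (s : List Int × Int) (i : Int) : List Int × Int :=
  let recent := rec3 [] s.1.reverse
  (s.1 ++ [i], s.2 + (if i ∈ recent then 1 else 60))

def solution_alt (__ : List Int) (___ : Int) : String :=
  PySem.Int.toStr (PySem.Int.floordiv (__.foldl solutionStepB (([] : List Int), (0 : Int))).2 60) ++ "분 " ++
    PySem.Int.toStr (PySem.Int.mod (__.foldl solutionStepB (([] : List Int), (0 : Int))).2 60) ++ "초"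

-- ===== PRECONDITION & SPEC =====
def Spec_solution (__ : List Int) (___ : Int) (out : String) : Prop := out = solution_alt __ ___
instance (__ : List Int) (___ : Int) (out : String) : Decidable (Spec_solution __ ___ out) := by unfold Spec_solution; infer_instance

-- ===== CLAIM (what is proved, stated in full; the proofs are below) =====
def Claim_equal_solution : Prop := ∀ (__ : List Int) (___ : Int), Dom_solution __ ___ → Spec_solution __ ___ (solution __ ___)

-- ===== LEMMAS AND PROOFS =====

-- an unbounded version of B's inner loop: all distinct values of l, first occurrences kept
def dstep (acc : List Int) (x : Int) : List Int :=
  if x ∈ acc then acc else acc ++ [x]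

def ded (l : List Int) : List Int := l.foldl dstep []

theorem ded_acc : ∀ (l acc : List Int),
    l.foldl dstep acc = acc ++ (ded l).filter (fun y => y ∉ acc) := by
  intro l
  induction l with
  | nil => intro acc; simp [ded]
  | cons x l ih =>
    intro acc
    have hx : ded (x :: l) = [x] ++ (ded l).filter (fun y => y ∉ ([x] : List Int)) := by
      show (x :: l).foldl dstep [] = _
      simp only [List.foldl_cons]
      have : dstep [] x = [x] := by simp [dstep]
      rw [this, ih]
    by_cases hmem : x ∈ acc
    · have hd : dstep acc x = acc := by simp [dstep, hmem]
      simp only [List.foldl_cons, hd, ih, hx]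
      congr 1
      rw [List.filter_append, List.filter_filter]
      simp only [List.filter_cons]
      have hxf : (decide (x ∉ acc)) = false := by simp [hmem]
      simp only [hxf, Bool.false_eq_true, if_false, List.filter_nil, List.nil_append]
      exact (List.filter_congr (fun a _ => by
        by_cases hax : a = x <;> simp [hax, hmem])).symm
    · have hd : dstep acc x = acc ++ [x] := by simp [dstep, hmem]
      simp only [List.foldl_cons, hd, ih, hx]
      rw [List.filter_append, List.filter_filter, List.append_assoc]
      congr 1
      have hx1 : List.filter (fun y => decide (y ∉ acc)) [x] = [x] := by simp [hmem]
      rw [hx1, List.singleton_append]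
      congr 1
      exact List.filter_congr (fun a _ => by
        by_cases h1 : a ∈ acc <;> by_cases h2 : a = x <;> simp [h1, h2])

theorem ded_cons (x : Int) (l : List Int) :
    ded (x :: l) = x :: (ded l).filter (fun y => y ≠ x) := by
  show (x :: l).foldl dstep [] = _
  simp only [List.foldl_cons]
  have : dstep [] x = [x] := by simp [dstep]
  rw [this, ded_acc]
  simp

theorem ded_nodup : ∀ (l : List Int), (ded l).Nodup := by
  intro l
  induction l with
  | nil => simp [ded]
  | cons x l ih =>
    rw [ded_cons]
    refine List.Nodup.cons ?_ (ih.filter _)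
    intro hmem
    have := List.of_mem_filter hmem
    simp at this

-- erasing the first occurrence = removing at the index Python's .index returns
theorem erase_eq_of_index? : ∀ (xs : List Int) (v : Int) (k : Nat),
    PySem.List.index? xs v = some k → xs.erase v = xs.eraseIdx k := by
  intro xs
  induction xs with
  | nil => intro v k h; simp [PySem.List.index?] at h
  | cons x xs ih =>
    intro v k h
    by_cases hx : x = v
    · subst hx
      rw [PySem.List.index?_cons_self] at h
      cases h
      simp [List.erase_cons_head]
    · rw [PySem.List.index?_cons_of_ne xs hx] at h
      cases hk : PySem.List.index? xs v with
      | none => rw [hk] at h; simp at h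
      | some k' =>
        rw [hk] at h; simp at h
        subst h
        rw [List.erase_cons_tail (by simp [hx]), List.eraseIdx_cons_succ, ih v k' hk]

-- A's loop body, hit case
theorem stepA_hit (cs : List Int) (ans i : Int) (hmem : i ∈ cs) :
    solutionStepA (cs, ans) i = (cs.erase i ++ [i], ans + 1) := by
  have hidx := (PySem.List.index?_isSome_iff cs i).mpr hmem
  obtain ⟨k, hk⟩ := Option.isSome_iff_exists.mp hidx
  obtain ⟨hklt, hget, -⟩ := PySem.List.getElem_of_index?_eq_some hk
  have hk' : List.idxOf? i cs = some k := by
    rw [← PySem.List.index?_eq_idxOf?]; exact hk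
  have hpop := PySem.List.pop?_natCast cs k hklt
  have herase := erase_eq_of_index? cs i k hk
  by_cases hlen : cs.length < 3 <;>
    simp [solutionStepA, hlen, hmem, hk', hpop, hget, herase]

-- reverse of tail = dropLast of reverse
theorem tail_reverse (l : List Int) : l.tail.reverse = l.reverse.dropLast := by
  cases l with
  | nil => rfl
  | cons a t => simp

-- filtering i out of the first three = first two of the filtered list, when i is among the first three
theorem take3_filter (D : List Int) (i : Int) (hD : D.Nodup) (hi : i ∈ D.take 3) :
    (D.take 3).filter (fun y => y ≠ i) = (D.filter (fun y => y ≠ i)).take 2 := by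
  have htake : (D.take 3).Nodup := List.Nodup.sublist (List.take_sublist 3 D) hD
  have hfe : ∀ (l : List Int), l.Nodup → l.filter (fun y => y ≠ i) = l.erase i := by
    intro l hl
    rw [hl.erase_eq_filter i]
    exact List.filter_congr (fun a _ => by by_cases hai : a = i <;> simp [hai])
  have hlf : ((D.take 3).filter (fun y => y ≠ i)).length = (D.take 3).length - 1 := by
    rw [hfe _ htake]; exact List.length_erase_of_mem hi
  by_cases hlen : D.length ≤ 3
  · rw [List.take_of_length_le hlen] at *
    have hle : (D.filter (fun y => y ≠ i)).length ≤ 2 := by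
      rw [hfe D hD, List.length_erase_of_mem hi]; omega
    exact (List.take_of_length_le hle).symm
  · have h3 : (D.take 3).length = 3 := by rw [List.length_take]; omega
    have h2 : ((D.take 3).filter (fun y => y ≠ i)).length = 2 := by rw [hlf, h3]
    conv_rhs => rw [← List.take_append_drop 3 D]
    rw [List.filter_append, List.take_append, h2, List.take_of_length_le (le_of_eq h2)]
    simp

-- i absent from the first three: filtering it out does not change the first two
theorem take2_filter (D : List Int) (i : Int) (h3 : 3 ≤ D.length) (hi : i ∉ D.take 3) :
    (D.filter (fun y => y ≠ i)).take 2 = D.take 2 := by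
  have hsel : (D.take 3).filter (fun y => y ≠ i) = D.take 3 :=
    List.filter_eq_self.mpr (fun a ha => by
      simp only [decide_eq_true_eq]
      rintro rfl; exact hi ha)
  conv_lhs => rw [← List.take_append_drop 3 D]
  rw [List.filter_append, hsel, List.take_append, List.length_take]
  have hm : min 3 D.length = 3 := by omega
  rw [hm]
  simp [List.take_take]

-- invariant preservation, hit case
theorem inv_hit (D cs : List Int) (i : Int) (hD : D.Nodup)
    (h : cs.reverse = D.take 3) (hi : i ∈ cs) :
    (cs.erase i ++ [i]).reverse = (i :: (D.filter (fun y => y ≠ i))).take 3 := by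
  have hiD3 : i ∈ D.take 3 := by rw [← h]; simpa using hi
  have htake : (D.take 3).Nodup := List.Nodup.sublist (List.take_sublist 3 D) hD
  have hcs : cs.Nodup := by rw [← List.nodup_reverse, h]; exact htake
  have he : cs.erase i = cs.filter (fun y => y ≠ i) := by
    rw [hcs.erase_eq_filter i]
    exact (List.filter_congr (fun a _ => by by_cases hai : a = i <;> simp [hai])).symm
  calc (cs.erase i ++ [i]).reverse = i :: (cs.erase i).reverse := by simp
    _ = i :: (cs.reverse.filter (fun y => y ≠ i)) := by rw [he, List.filter_reverse]
    _ = i :: ((D.take 3).filter (fun y => y ≠ i)) := by rw [h]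
    _ = i :: ((D.filter (fun y => y ≠ i)).take 2) := by rw [take3_filter D i hD hiD3]
    _ = (i :: (D.filter (fun y => y ≠ i))).take 3 := rfl

theorem inv_miss_small (D cs : List Int) (i : Int)
    (h : cs.reverse = D.take 3) (hlen : cs.length < 3) (hi : i ∉ cs) :
    (cs ++ [i]).reverse = (i :: (D.filter (fun y => y ≠ i))).take 3 := by
  have hlenD : D.length < 3 := by
    have := congrArg List.length h
    simp [List.length_take] at this
    omega
  have ht : D.take 3 = D := List.take_of_length_le (by omega)
  have hrev : cs.reverse = D := by rw [h, ht]
  have hiD : i ∉ D := by rw [← hrev]; simpa using hi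
  have hf : D.filter (fun y => y ≠ i) = D :=
    List.filter_eq_self.mpr (fun a ha => by
      simp only [decide_eq_true_eq]
      rintro rfl; exact hiD ha)
  have ht2 : D.take 2 = D := List.take_of_length_le (by omega)
  calc (cs ++ [i]).reverse = i :: cs.reverse := by simp
    _ = i :: D := by rw [hrev]
    _ = i :: D.take 2 := by rw [ht2]
    _ = (i :: (D.filter (fun y => y ≠ i))).take 3 := by rw [hf]; exact rfl

theorem inv_miss_full (D cs : List Int) (i : Int)
    (h : cs.reverse = D.take 3) (hlen : ¬ cs.length < 3) (hi : i ∉ cs) :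
    (cs.tail ++ [i]).reverse = (i :: (D.filter (fun y => y ≠ i))).take 3 := by
  have hlenD : 3 ≤ D.length := by
    have := congrArg List.length h
    simp [List.length_take] at this
    omega
  have hiD3 : i ∉ D.take 3 := by rw [← h]; simpa using hi
  have hdl : (D.take 3).dropLast = D.take 2 := by
    rw [List.dropLast_eq_take, List.length_take, List.take_take]
    congr 1
    omega
  calc (cs.tail ++ [i]).reverse = i :: cs.tail.reverse := by simp
    _ = i :: cs.reverse.dropLast := by rw [tail_reverse]
    _ = i :: (D.take 3).dropLast := by rw [h]
    _ = i :: D.take 2 := by rw [hdl]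
    _ = i :: ((D.filter (fun y => y ≠ i)).take 2) := by rw [take2_filter D i hlenD hiD3]
    _ = (i :: (D.filter (fun y => y ≠ i))).take 3 := rfl

theorem ded_snoc (p : List Int) (i : Int) :
    ded (p ++ [i]).reverse = i :: (ded p.reverse).filter (fun y => y ≠ i) := by
  rw [List.reverse_append]
  simp only [List.reverse_cons, List.reverse_nil, List.nil_append, List.singleton_append]
  exact ded_cons i p.reverse

-- B's bounded backward scan computes the first three entries of the full dedup
theorem rec3_eq : ∀ (l acc : List Int), acc.length < 3 →
    rec3 acc l = (l.foldl dstep acc).take 3 := by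
  intro l
  induction l with
  | nil =>
    intro acc h
    simp only [rec3, List.foldl_nil]
    exact (List.take_of_length_le (by omega)).symm
  | cons x l ih =>
    intro acc h
    by_cases hx : x ∈ acc
    · have hd : dstep acc x = acc := by simp [dstep, hx]
      simp only [rec3, if_pos hx, List.foldl_cons, hd, ih acc h]
    · have hd : dstep acc x = acc ++ [x] := by simp [dstep, hx]
      by_cases h3 : (acc ++ [x]).length = 3
      · simp only [rec3, if_neg hx, if_pos h3, List.foldl_cons, hd]
        rw [ded_acc, List.take_append, h3, List.take_of_length_le (le_of_eq h3)]
        simp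
      · have h3' : (acc ++ [x]).length < 3 := by
          rcases Nat.lt_or_ge (acc ++ [x]).length 3 with hlt | hge
          · exact hlt
          · exfalso
            have : (acc ++ [x]).length = acc.length + 1 := by simp
            omega
        simp only [rec3, if_neg hx, if_neg h3, List.foldl_cons, hd, ih _ h3']

theorem stepB_eq (p : List Int) (ans i : Int) :
    solutionStepB (p, ans) i =
      (p ++ [i], ans + (if i ∈ (ded p.reverse).take 3 then 1 else 60)) := by
  unfold solutionStepB
  rw [rec3_eq p.reverse [] (by norm_num)]
  exact rfl

theorem fold_eq : ∀ (xs p cs : List Int) (ans : Int),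
    cs.reverse = (ded p.reverse).take 3 →
    (xs.foldl solutionStepA (cs, ans)).2 = (xs.foldl solutionStepB (p, ans)).2 := by
  intro xs
  induction xs with
  | nil => intro p cs ans _; rfl
  | cons i xs ih =>
    intro p cs ans h
    have hmemiff : i ∈ cs ↔ i ∈ (ded p.reverse).take 3 := by
      rw [← h]; simp
    simp only [List.foldl_cons, stepB_eq]
    by_cases hi : i ∈ cs
    · rw [stepA_hit cs ans i hi, if_pos (hmemiff.mp hi)]
      exact ih (p ++ [i]) _ _ (by
        rw [ded_snoc]
        exact inv_hit (ded p.reverse) cs i (ded_nodup _) h hi)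
    · rw [if_neg (fun hc => hi (hmemiff.mpr hc))]
      by_cases hlen : cs.length < 3
      · have : solutionStepA (cs, ans) i = (cs ++ [i], ans + 60) := by
          simp [solutionStepA, hlen, hi]
        rw [this]
        exact ih (p ++ [i]) _ _ (by
          rw [ded_snoc]
          exact inv_miss_small (ded p.reverse) cs i h hlen hi)
      · have hne : cs ≠ [] := by
          intro hnil; rw [hnil] at hlen; simp at hlen
        obtain ⟨c, cs', hc⟩ := List.exists_cons_of_ne_nil hne
        have : solutionStepA (cs, ans) i = (cs.tail ++ [i], ans + 60) := by
          subst hc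
          simp only [solutionStepA]
          rw [if_neg hlen, if_neg hi, PySem.List.pop?_zero_cons]
          rfl
        rw [this]
        exact ih (p ++ [i]) _ _ (by
          rw [ded_snoc]
          exact inv_miss_full (ded p.reverse) cs i h hlen hi)

-- ===== VERDICT (by name: the statement is the Claim_ definition above) =====
theorem solution_spec : Claim_equal_solution := by
  intro xs n _
  unfold Spec_solution solution solution_alt
  rw [fold_eq xs [] [] 0 (by simp [ded])]
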